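-- pv_equiv track=rewrite | github.com/basusubhendra/nam_myoho_renge_kyo | factorize.py | analyze_helper1
-- ===== SOURCE A (Python) =====
-- def analyze_helper1(posits):
--     prev_pos = -1
--     count = 0
--     snippet = []
--     for x in posits:
--         if prev_pos > -1 and prev_pos == x - 1:
--             snippet.append(str(bin(count)[2:][:-1]))
--             prev_pos = x
--             count = 1
--             continue
--         prev_pos = x
--         count = count + 1
--     if count > 0:
--         snippet.append(str(bin(count)[2:]))
--     return snippet
-- ===== SOURCE B (Python) =====
-- def analyze_helper1(posits):
--     # Staged pipeline: (1) cut points by index comprehension, (2) lengths as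
--     # successive differences, (3) binary formatting — no running loop state.
--     n = len(posits)
--     if n == 0:
--         return []
--     cuts = [0] + [i for i in range(1, n)
--                   if posits[i - 1] > -1 and posits[i] == posits[i - 1] + 1] + [n]
--     lengths = [b - a for a, b in zip(cuts, cuts[1:])]
--     return [bin(L)[2:][:-1] for L in lengths[:-1]] + [bin(lengths[-1])[2:]]
-- ===== Notes on version B (the rewrite author's own statement) =====
-- stated objective: alternative
-- what changed: B is a staged pipeline with no running loop state: an index comprehension collects the cut points where a consecutive-increment boundary occurs, segment lengths are then the successive differences of the cut list (zip with its tail), and a final pass formats the lengths as binary strings; A is a single stateful loop (prev_pos/count) emitting strings inline.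
import Mathlib
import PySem

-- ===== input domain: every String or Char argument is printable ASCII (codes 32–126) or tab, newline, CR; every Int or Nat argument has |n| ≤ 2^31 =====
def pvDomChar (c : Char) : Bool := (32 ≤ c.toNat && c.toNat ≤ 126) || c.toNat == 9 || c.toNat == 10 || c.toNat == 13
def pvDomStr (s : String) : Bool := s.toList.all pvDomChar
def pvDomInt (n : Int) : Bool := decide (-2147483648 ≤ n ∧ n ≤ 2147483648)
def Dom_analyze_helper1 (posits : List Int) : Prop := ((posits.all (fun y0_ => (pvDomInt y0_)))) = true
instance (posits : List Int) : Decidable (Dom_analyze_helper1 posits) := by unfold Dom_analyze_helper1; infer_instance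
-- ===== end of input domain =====

-- B is a staged pipeline (cut points by index comprehension → successive differences →
-- binary formatting) instead of A's single stateful loop; objective: alternative decomposition.

-- shared formatting helpers (both Pythons use the same expressions):
-- bin(n)[2:]
def binA (n : Int) : String := String.ofList (PySem.List.slice (PySem.Int.toBinChars0b n) (some 2) none)
-- bin(n)[2:][:-1]
def binA' (n : Int) : String :=
  String.ofList (PySem.List.slice (PySem.List.slice (PySem.Int.toBinChars0b n) (some 2) none) none (some (-1)))

-- ===== PORT A =====
def analyze_helper1 (posits : List Int) : List String :=
  let st := posits.foldl
    (fun (s : Int × Int × List String) x =>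
      let (prev_pos, count, snippet) := s
      if prev_pos > -1 && prev_pos == x - 1 then
        (x, 1, snippet ++ [binA' count])
      else
        (x, count + 1, snippet))
    (-1, 0, [])
  if st.2.1 > 0 then st.2.2 ++ [binA st.2.1] else st.2.2

-- ===== PORT B =====
def analyze_helper1_alt (posits : List Int) : List String :=
  let n : Int := PySem.List.len posits
  if n == 0 then []
  else
    -- indices i ∈ range(1, n) are always in range, so pyGetD's default is never used
    let cuts : List Int := [0] ++ ((PySem.List.pyRange 1 n 1).filter
        (fun i => (PySem.List.pyGetD posits (i - 1) 0 > -1) &&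
                  (PySem.List.pyGetD posits i 0 == PySem.List.pyGetD posits (i - 1) 0 + 1))) ++ [n]
    let lengths : List Int := (cuts.zip cuts.tail).map (fun p => p.2 - p.1)
    (PySem.List.slice lengths none (some (-1))).map (fun L => binA' L) ++
      [binA (PySem.List.pyGetD lengths (-1) 0)]

-- ===== PRECONDITION & SPEC =====
def Spec_analyze_helper1 (posits : List Int) (out : List String) : Prop := out = analyze_helper1_alt posits
instance (posits : List Int) (out : List String) : Decidable (Spec_analyze_helper1 posits out) := by unfold Spec_analyze_helper1; infer_instance

-- ===== CLAIM (what is proved, stated in full; the proofs are below) =====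
def Claim_equal_analyze_helper1 : Prop := ∀ (posits : List Int), Dom_analyze_helper1 posits → Spec_analyze_helper1 posits (analyze_helper1 posits)

-- ===== LEMMAS AND PROOFS =====

-- break condition common to both programs
def pvBrk (a b : Int) : Bool := a > -1 && b == a + 1

-- mid-level spec: segment lengths, A's traversal shape (explicit prev/count)
def lensAux (prev count : Int) : List Int → List Int
  | [] => if count > 0 then [count] else []
  | x :: xs => if pvBrk prev x then count :: lensAux x 1 xs else lensAux x (count + 1) xs

-- mid-level spec: segment lengths over adjacent pairs (B's cuts give these via diffs)
def lensSeg (run : Int) : List (Int × Int) → List Int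
  | [] => [run]
  | ab :: ps => if pvBrk ab.1 ab.2 then run :: lensSeg 1 ps else lensSeg (run + 1) ps

-- B's interior cut points, as a recursion over adjacent pairs with running index j
def boundsB (j : Int) : List (Int × Int) → List Int
  | [] => []
  | ab :: ps => if pvBrk ab.1 ab.2 then (j + 1) :: boundsB (j + 1) ps else boundsB (j + 1) ps

-- successive differences
def diffs : List Int → List Int
  | [] => []
  | [_] => []
  | a :: b :: t => (b - a) :: diffs (b :: t)

-- formatting: all but the last segment get binA', the last gets binA
def fmtLens : List Int → List String
  | [] => []
  | [l] => [binA l]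
  | l :: ls => binA' l :: fmtLens ls

theorem lensAux_ne_nil (xs : List Int) (prev count : Int) (h : 0 < count) :
    lensAux prev count xs ≠ [] := by
  induction xs generalizing prev count with
  | nil => simp [lensAux, h]
  | cons x xs ih =>
    simp only [lensAux]
    split
    · simp
    · exact ih x (count + 1) (by omega)

theorem fmtLens_cons (l : Int) (ls : List Int) (h : ls ≠ []) :
    fmtLens (l :: ls) = binA' l :: fmtLens ls := by
  cases ls with
  | nil => exact absurd rfl h
  | cons a as => rfl

-- A's fold (with final append) computes snippet ++ fmtLens of the remaining segment lengths
theorem foldA_eq (xs : List Int) (prev count : Int) (snippet : List String) :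
    (let st := xs.foldl
        (fun (s : Int × Int × List String) x =>
          let (prev_pos, count, snippet) := s
          if prev_pos > -1 && prev_pos == x - 1 then
            (x, 1, snippet ++ [binA' count])
          else
            (x, count + 1, snippet))
        (prev, count, snippet)
      if st.2.1 > 0 then st.2.2 ++ [binA st.2.1] else st.2.2)
    = snippet ++ fmtLens (lensAux prev count xs) := by
  induction xs generalizing prev count snippet with
  | nil =>
    by_cases h : 0 < count
    · simp [lensAux, h, fmtLens]
    · simp [lensAux, fmtLens, h]
  | cons x xs ih =>
    simp only [List.foldl_cons, lensAux]
    have hb : (prev > -1 && prev == x - 1) = pvBrk prev x := by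
      simp only [pvBrk]
      by_cases h1 : prev > -1
      · simp [h1]; constructor <;> (intro h; omega)
      · simp [h1]
    rw [hb]
    by_cases h : pvBrk prev x
    · simp only [h, if_true]
      rw [ih x 1 (snippet ++ [binA' count])]
      have h1 : 0 < (1 : Int) := by omega
      rw [fmtLens_cons count _ (lensAux_ne_nil xs x 1 h1)]
      simp
    · simp only [Bool.not_eq_true] at h
      simp only [h, Bool.false_eq_true, if_false]
      exact ih x (count + 1) snippet

-- successive differences via zip with the tail
theorem zip_diffs (c : List Int) :
    (c.zip c.tail).map (fun p => p.2 - p.1) = diffs c := by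
  induction c with
  | nil => rfl
  | cons a t ih =>
    cases t with
    | nil => rfl
    | cons b u => simp only [List.tail_cons, List.zip_cons_cons, List.map_cons, diffs]
                  rw [← ih]; rfl

-- diffs of the cut list = segment lengths
theorem diffs_cuts (ps : List (Int × Int)) (start cur : Int) :
    diffs (start :: (boundsB cur ps ++ [cur + ps.length + 1])) = lensSeg (cur + 1 - start) ps := by
  induction ps generalizing start cur with
  | nil => simp [boundsB, diffs, lensSeg]
  | cons ab ps ih =>
    simp only [boundsB, lensSeg, List.length_cons]
    push_cast
    by_cases h : pvBrk ab.1 ab.2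
    · simp only [h, if_true, List.cons_append]
      show ((cur + 1) - start) :: diffs ((cur + 1) :: (boundsB (cur + 1) ps ++ [cur + (↑ps.length + 1) + 1])) = _
      have : cur + (↑ps.length + 1) + 1 = (cur + 1) + ↑ps.length + 1 := by ring
      rw [this, ih (cur + 1) (cur + 1)]
      norm_num
    · simp only [Bool.not_eq_true] at h
      simp only [h, Bool.false_eq_true, if_false]
      have : cur + (↑ps.length + 1) + 1 = (cur + 1) + ↑ps.length + 1 := by ring
      rw [this, ih start (cur + 1)]
      have : cur + 1 + 1 - start = cur + 1 - start + 1 := by ring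
      rw [this]

-- the two traversal shapes produce the same segment lengths
theorem lensSeg_eq_lensAux (xs : List Int) (x : Int) (c : Int) (hc : 0 < c) :
    lensSeg c ((x :: xs).zip xs) = lensAux x c xs := by
  induction xs generalizing x c with
  | nil => simp [lensSeg, lensAux, hc]
  | cons y ys ih =>
    simp only [List.zip_cons_cons, lensSeg, lensAux]
    by_cases h : pvBrk x y
    · simp [h, ih y 1 (by omega)]
    · simp only [Bool.not_eq_true] at h
      simp [h, ih y (c + 1) (by omega)]

-- B's index-comprehension filter, rewritten over Nat range, equals boundsB of adjacent pairs
theorem filter_range_eq_boundsB (xs : List Int) (x : Int) (j : Int) :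
    ((List.range xs.length).filter
        (fun k => pvBrk ((x :: xs).getD k 0) ((x :: xs).getD (k + 1) 0))).map
        (fun (k : Nat) => ((j + 1 + (k : Int)) : Int))
      = boundsB j ((x :: xs).zip xs) := by
  induction xs generalizing x j with
  | nil => rfl
  | cons y t ih =>
    simp only [List.length_cons, List.range_succ_eq_map, List.filter_cons, List.zip_cons_cons,
      boundsB]
    have h0 : pvBrk ((x :: y :: t).getD 0 0) ((x :: y :: t).getD (0 + 1) 0) = pvBrk x y := rfl
    rw [h0]
    have hfc : (List.range t.length).filter
          ((fun k => pvBrk ((x :: y :: t).getD k 0) ((x :: y :: t).getD (k + 1) 0)) ∘ Nat.succ)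
        = (List.range t.length).filter
          (fun k => pvBrk ((y :: t).getD k 0) ((y :: t).getD (k + 1) 0)) :=
      List.filter_congr (fun a _ => rfl)
    have htail : (((List.range t.length).map Nat.succ).filter
          (fun k => pvBrk ((x :: y :: t).getD k 0) ((x :: y :: t).getD (k + 1) 0))).map
          (fun (k : Nat) => ((j + 1 + (k : Int)) : Int))
        = boundsB (j + 1) ((y :: t).zip t) := by
      rw [List.filter_map, hfc, List.map_map, ← ih y (j + 1)]
      apply List.map_congr_left
      intro a _
      simp only [Function.comp_apply, Nat.succ_eq_add_one]
      push_cast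
      ring
    by_cases h : pvBrk x y
    · simp only [h, if_true, List.map_cons]
      rw [htail]
      congr 1
      norm_num
    · simp only [h, Bool.false_eq_true, if_false]
      exact htail

-- the final formatting phase of B equals fmtLens
theorem fmtLens_eq_map (ls : List Int) (h : ls ≠ []) :
    ls.dropLast.map (fun L => binA' L) ++ [binA (ls.getLast h)] = fmtLens ls := by
  induction ls with
  | nil => exact absurd rfl h
  | cons l ls ih =>
    cases ls with
    | nil => rfl
    | cons a as =>
      rw [fmtLens_cons l (a :: as) (by simp), ← ih (by simp)]
      simp [List.getLast_cons]

-- ===== VERDICT (by name: the statement is the Claim_ definition above) =====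
theorem analyze_helper1_spec : Claim_equal_analyze_helper1 := by
  intro posits _
  show analyze_helper1 posits = analyze_helper1_alt posits
  cases posits with
  | nil => rfl
  | cons x xs =>
    unfold analyze_helper1 analyze_helper1_alt
    rw [foldA_eq (x :: xs) (-1) 0 []]
    have hn : (PySem.List.len (x :: xs) == 0) = false := by
      simp only [PySem.List.len_eq, List.length_cons]
      rw [beq_eq_false_iff_ne]
      omega
    simp only [hn, Bool.false_eq_true, if_false, List.nil_append]
    -- rewrite the pyRange filter into the Nat-range form
    have hlen : PySem.List.len (x :: xs) = ((xs.length + 1 : Nat) : Int) := by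
      simp [PySem.List.len_eq]
    rw [hlen]
    have hfilter :
        ((PySem.List.pyRange 1 ((xs.length + 1 : Nat) : Int) 1).filter
          (fun i => (PySem.List.pyGetD (x :: xs) (i - 1) 0 > -1) &&
                    (PySem.List.pyGetD (x :: xs) i 0 == PySem.List.pyGetD (x :: xs) (i - 1) 0 + 1)))
        = boundsB 0 ((x :: xs).zip xs) := by
      rw [PySem.List.pyRange_one]
      have harg : (((xs.length + 1 : Nat) : Int) - 1).toNat = xs.length := by omega
      rw [harg, List.filter_map]
      rw [← filter_range_eq_boundsB xs x 0]
      rw [List.filter_congr]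
      · apply List.map_congr_left; intro a _; norm_num [add_comm]
      · intro k _
        simp only [Function.comp_apply]
        have h2 : (1 : Int) + (k : Int) = (((k + 1 : Nat)) : Int) := by push_cast; ring
        have h1 : (((k + 1 : Nat)) : Int) - 1 = ((k : Nat) : Int) := by push_cast; ring
        simp only [h2, h1, PySem.List.pyGetD_natCast, List.getD_cons_succ, pvBrk]
    rw [hfilter]
    have hL : ((([(0 : Int)] ++ boundsB 0 ((x :: xs).zip xs) ++ [((xs.length + 1 : Nat) : Int)]).zip
          (([(0 : Int)] ++ boundsB 0 ((x :: xs).zip xs) ++ [((xs.length + 1 : Nat) : Int)]).tail)).map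
          (fun p => p.2 - p.1)) = lensAux x 1 xs := by
      rw [zip_diffs]
      have hc : [(0 : Int)] ++ boundsB 0 ((x :: xs).zip xs) ++ [((xs.length + 1 : Nat) : Int)]
          = (0 : Int) :: (boundsB 0 ((x :: xs).zip xs) ++ [0 + (((x :: xs).zip xs).length : Int) + 1]) := by
        simp [List.length_zip]
      rw [hc, diffs_cuts]
      norm_num
      exact lensSeg_eq_lensAux xs x 1 (by omega)
    rw [hL]
    have hne : lensAux x 1 xs ≠ [] := lensAux_ne_nil xs x 1 (by omega)
    rw [PySem.List.slice_to_neg_one, PySem.List.pyGetD_neg_one _ _ hne]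
    have hstart : lensAux (-1) 0 (x :: xs) = lensAux x 1 xs := by
      simp [lensAux, pvBrk]
    rw [hstart]
    exact (fmtLens_eq_map (lensAux x 1 xs) hne).symm
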